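-- pv_equiv track=rewrite | github.com/shimanshe/erl-doc | util.py | join_url
-- ===== SOURCE A (Python) =====
-- def get_url_root(url):
-- 	pos = url.find('//')
-- 	if pos == -1:
-- 		pos = 0
-- 	else:
-- 		pos += 2
-- 	pos = url.find('/', pos)
-- 	if pos == -1:
-- 		pos = len(url)
-- 	url = url[0:pos]
-- 	if not url.endswith('/'):
-- 		url += '/'
-- 	return url
--
-- def get_url_dir(url):
-- 	if not url.endswith('/'):
-- 		pos = url.rfind('/')
-- 		if pos != -1:
-- 			url = url[0:pos+1]
-- 	return url
--
-- def get_parent_url(url):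
-- 	root_path = get_url_root(url)
-- 	if url.endswith('/'):
-- 		url = url[0:-1]
-- 	pos = url.rfind('/')
-- 	parent_url = url[0:pos+1]
-- 	if len(parent_url) < len(root_path):
-- 		return root_path
-- 	else:
-- 		return parent_url
--
-- def join_url(url, path):
-- 	if path.startswith('http://') or path.startswith('https://'):
-- 		return path
-- 	if path.startswith('/'):
-- 		url = get_url_root(url)
-- 		path = path[1:]
-- 	else:
-- 		url = get_url_dir(url)
-- 		while True:
-- 			if path.startswith('./'):
-- 				path = path[2:]
-- 			elif path.startswith('../'):
-- 				url = get_parent_url(url)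
-- 				path = path[3:]
-- 			else:
-- 				break
-- 	if not url.endswith('/'):
-- 		url += '/'
-- 	return url + path
-- ===== SOURCE B (Python) =====
-- def _root_count(segs):
--     # number of leading segments forming the scheme/host root: the first empty
--     # segment strictly inside the list marks a '//'
--     for i in range(1, len(segs) - 1):
--         if segs[i] == '':
--             return i + 1 if segs[i + 1] == '' else i + 2
--     return 1
--
--
-- def _strip_dots(path):
--     # one tokenizing pass: count leading '../' tokens, skip './' tokens
--     k = 0
--     while True:
--         if path.startswith('./'):
--             path = path[2:]
--         elif path.startswith('../'):
--             k += 1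
--             path = path[3:]
--         else:
--             return k, path
--
--
-- def join_url(url, path):
--     if path.startswith('http://') or path.startswith('https://'):
--         return path
--     segs = url.split('/')
--     if path.startswith('/'):
--         keep, rest = _root_count(segs), path[1:]
--     else:
--         if len(segs) >= 2:
--             segs = segs[:-1] + ['']
--         k, rest = _strip_dots(path)
--         # closed form: each '..' drops one directory, clamped at the root
--         keep = max(_root_count(segs), len(segs) - 1 - k)
--     return '/'.join(segs[:keep] + ['']) + rest
-- ===== Notes on version B (the rewrite author's own statement) =====
-- stated objective: alternative
-- what changed: A rewrites the URL string once per leading '../' (recomputing the root and parent URL each iteration); B instead tokenizes the dot-prefix of path in one pass to a count k of '..' tokens and computes the surviving directory count in closed form as max(root_count, dirs - k), cutting the '/'-split segment list once.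
import Mathlib
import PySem

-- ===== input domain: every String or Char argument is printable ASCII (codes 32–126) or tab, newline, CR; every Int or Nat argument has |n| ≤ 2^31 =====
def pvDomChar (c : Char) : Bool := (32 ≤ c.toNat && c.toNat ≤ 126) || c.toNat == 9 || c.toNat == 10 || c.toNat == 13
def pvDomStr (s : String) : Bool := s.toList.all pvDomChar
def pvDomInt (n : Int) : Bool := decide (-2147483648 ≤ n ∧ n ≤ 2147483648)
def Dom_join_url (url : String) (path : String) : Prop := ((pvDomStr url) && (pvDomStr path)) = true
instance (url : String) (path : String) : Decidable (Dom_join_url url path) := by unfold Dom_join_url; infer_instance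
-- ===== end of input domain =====

-- B is an alternative implementation: instead of A's loop that rewrites the URL once per
-- leading '../' (recomputing root and parent each time), B tokenizes the dot-prefix of
-- path once into a count k of '..' tokens and cuts the '/'-split base once at the
-- closed-form index max(root_count, dirs - k).

-- ===== PORT A =====
-- literal transliteration of get_url_root
def getUrlRoot (url : List Char) : List Char :=
  let pos : Int := PySem.Chars.find url ['/', '/']
  let pos : Int := if pos = -1 then 0 else pos + 2
  let pos2 : Int := PySem.Chars.findFrom url ['/'] pos
  let pos2 : Int := if pos2 = -1 then PySem.Chars.len url else pos2
  let url2 := PySem.Chars.slice url (some 0) (some pos2)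
  if PySem.Chars.endswith url2 ['/'] then url2 else url2 ++ ['/']

-- literal transliteration of get_url_dir
def getUrlDir (url : List Char) : List Char :=
  if PySem.Chars.endswith url ['/'] then url
  else
    let pos : Int := PySem.Chars.rfind url ['/']
    if pos ≠ -1 then PySem.Chars.slice url (some 0) (some (pos + 1)) else url

-- literal transliteration of get_parent_url
def getParentUrl (url : List Char) : List Char :=
  let rootPath := getUrlRoot url
  let url2 := if PySem.Chars.endswith url ['/'] then PySem.Chars.slice url (some 0) (some (-1)) else url
  let pos : Int := PySem.Chars.rfind url2 ['/']
  let parentUrl := PySem.Chars.slice url2 (some 0) (some (pos + 1))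
  if PySem.Chars.len parentUrl < PySem.Chars.len rootPath then rootPath else parentUrl

-- the 'while True' loop of join_url (relative-path branch)
def relLoopA (url path : List Char) : List Char × List Char :=
  if PySem.Chars.startswith path ['.', '/'] then
    relLoopA url (PySem.Chars.slice path (some 2) none)
  else if PySem.Chars.startswith path ['.', '.', '/'] then
    relLoopA (getParentUrl url) (PySem.Chars.slice path (some 3) none)
  else (url, path)
termination_by path.length
decreasing_by
  · have h2 : (['.', '/'] : List Char) <+: path := (PySem.Chars.startswith_iff _ _).1 (by assumption)
    have := h2.length_le
    simp only [PySem.Chars.slice_eq_listSlice]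
    rw [show (2:Int) = ((2:Nat):Int) by norm_num, PySem.List.slice_from_natCast]
    simp at this ⊢; omega
  · have h2 : (['.', '.', '/'] : List Char) <+: path := (PySem.Chars.startswith_iff _ _).1 (by assumption)
    have := h2.length_le
    simp only [PySem.Chars.slice_eq_listSlice]
    rw [show (3:Int) = ((3:Nat):Int) by norm_num, PySem.List.slice_from_natCast]
    simp at this ⊢; omega

-- trailing 'if not url.endswith('/'): url += '/'' + concatenation
def finishA (url path : List Char) : List Char :=
  (if PySem.Chars.endswith url ['/'] then url else url ++ ['/']) ++ path

def joinUrlA (url path : List Char) : List Char :=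
  if PySem.Chars.startswith path "http://".toList || PySem.Chars.startswith path "https://".toList then
    path
  else if PySem.Chars.startswith path ['/'] then
    finishA (getUrlRoot url) (PySem.Chars.slice path (some 1) none)
  else
    let r := relLoopA (getUrlDir url) path
    finishA r.1 r.2

def join_url (url : String) (path : String) : String :=
  String.ofList (joinUrlA url.toList path.toList)

-- ===== PORT B =====
-- the 'for i in range(1, len(segs)-1)' scan of _root_count, walked over segs.drop 1
def rootCountGo : List (List Char) → Nat → Nat
  | s :: t :: r, i => if s = [] then (if t = [] then i + 1 else i + 2) else rootCountGo (t :: r) (i + 1)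
  | _, _ => 1

def rootCount (segs : List (List Char)) : Nat := rootCountGo (segs.drop 1) 1

-- _strip_dots: one tokenizing pass, counting leading '../' and skipping './'
def stripDots (path : List Char) : Nat × List Char :=
  if PySem.Chars.startswith path ['.', '/'] then
    stripDots (PySem.Chars.slice path (some 2) none)
  else if PySem.Chars.startswith path ['.', '.', '/'] then
    let r := stripDots (PySem.Chars.slice path (some 3) none)
    (r.1 + 1, r.2)
  else (0, path)
termination_by path.length
decreasing_by
  · have h2 : (['.', '/'] : List Char) <+: path := (PySem.Chars.startswith_iff _ _).1 (by assumption)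
    have := h2.length_le
    simp only [PySem.Chars.slice_eq_listSlice]
    rw [show (2:Int) = ((2:Nat):Int) by norm_num, PySem.List.slice_from_natCast]
    simp at this ⊢; omega
  · have h2 : (['.', '.', '/'] : List Char) <+: path := (PySem.Chars.startswith_iff _ _).1 (by assumption)
    have := h2.length_le
    simp only [PySem.Chars.slice_eq_listSlice]
    rw [show (3:Int) = ((3:Nat):Int) by norm_num, PySem.List.slice_from_natCast]
    simp at this ⊢; omega

def joinUrlB (url path : List Char) : List Char :=
  if PySem.Chars.startswith path "http://".toList || PySem.Chars.startswith path "https://".toList then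
    path
  else
    let segs := PySem.Chars.splitOn url ['/']
    if PySem.Chars.startswith path ['/'] then
      PySem.Chars.join ['/'] (segs.take (rootCount segs) ++ [[]]) ++ PySem.Chars.slice path (some 1) none
    else
      let segs1 := if 2 ≤ segs.length then segs.dropLast ++ [[]] else segs
      let kr := stripDots path
      let keep := max (rootCount segs1) (segs1.length - 1 - kr.1)
      PySem.Chars.join ['/'] (segs1.take keep ++ [[]]) ++ kr.2

def join_url_alt (url : String) (path : String) : String :=
  String.ofList (joinUrlB url.toList path.toList)

-- ===== PRECONDITION & SPEC =====
def Spec_join_url (url : String) (path : String) (out : String) : Prop := out = join_url_alt url path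
instance (url : String) (path : String) (out : String) : Decidable (Spec_join_url url path out) := by unfold Spec_join_url; infer_instance

-- ===== CLAIM (what is proved, stated in full; the proofs are below) =====
def Claim_equal_join_url : Prop := ∀ (url : String) (path : String), Dom_join_url url path → Spec_join_url url path (join_url url path)

-- ===== LEMMAS AND PROOFS =====

-- J renders a segment list back to a URL string; SF says no segment contains '/'
def J (l : List (List Char)) : List Char := List.intercalate ['/'] l

def SF (l : List (List Char)) : Prop := ∀ s ∈ l, '/' ∉ s

-- proof-side segment-level mirror of A's helpers (used only to relate A's string
-- manipulation to B's closed form)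
def rootKgo : List (List Char) → Nat → Option Nat
  | [], _ => none
  | [_], _ => none
  | s :: t :: r, i => if s = [] then some (i + 2) else rootKgo (t :: r) (i + 1)

def rootSegs (segs : List (List Char)) : List (List Char) :=
  let k := (rootKgo (segs.drop 1) 1).getD 1
  let r := segs.take k
  if r.length < 2 ∨ r.getLast? ≠ some [] then r ++ [[]] else r

def parentSegs (segs : List (List Char)) : List (List Char) :=
  let r := rootSegs segs
  let t := if 2 ≤ segs.length ∧ segs.getLast? = some [] then segs.dropLast else segs
  if t.length < 2 then r
  else
    let p := t.dropLast ++ [[]]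
    if p.length < r.length then r else p

def relLoopB (segs : List (List Char)) (path : List Char) : List (List Char) × List Char :=
  if PySem.Chars.startswith path ['.', '/'] then
    relLoopB segs (PySem.Chars.slice path (some 2) none)
  else if PySem.Chars.startswith path ['.', '.', '/'] then
    relLoopB (parentSegs segs) (PySem.Chars.slice path (some 3) none)
  else (segs, path)
termination_by path.length
decreasing_by
  · have h2 : (['.', '/'] : List Char) <+: path := (PySem.Chars.startswith_iff _ _).1 (by assumption)
    have := h2.length_le
    simp only [PySem.Chars.slice_eq_listSlice]
    rw [show (2:Int) = ((2:Nat):Int) by norm_num, PySem.List.slice_from_natCast]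
    simp at this ⊢; omega
  · have h2 : (['.', '.', '/'] : List Char) <+: path := (PySem.Chars.startswith_iff _ _).1 (by assumption)
    have := h2.length_le
    simp only [PySem.Chars.slice_eq_listSlice]
    rw [show (3:Int) = ((3:Nat):Int) by norm_num, PySem.List.slice_from_natCast]
    simp at this ⊢; omega

theorem J_nil : J [] = [] := by simp [J, List.intercalate]

theorem J_single (s : List Char) : J [s] = s := by simp [J, List.intercalate]

theorem J_cons2 (s t : List Char) (r : List (List Char)) :
    J (s :: t :: r) = s ++ '/' :: J (t :: r) := by
  simp [J, List.intercalate, List.intersperse]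

theorem J_cons (s : List Char) (r : List (List Char)) (h : r ≠ []) :
    J (s :: r) = s ++ '/' :: J r := by
  cases r with
  | nil => exact absurd rfl h
  | cons t r => exact J_cons2 s t r

theorem J_concat (xs : List (List Char)) (h : xs ≠ []) (s : List Char) :
    J (xs ++ [s]) = J xs ++ '/' :: s := by
  induction xs with
  | nil => exact absurd rfl h
  | cons x xs ih =>
    cases xs with
    | nil => simp [J_cons2, J_single]
    | cons y ys =>
      rw [List.cons_append, J_cons x _ (by simp), J_cons x (y :: ys) (by simp), ih (by simp)]
      simp

theorem J_split (segs : List (List Char)) (n : Nat) (h1 : 1 ≤ n) (h2 : n < segs.length) :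
    J segs = J (segs.take n) ++ '/' :: J (segs.drop n) := by
  induction segs generalizing n with
  | nil => simp at h2
  | cons s rest ih =>
    match n, h1 with
    | 1, _ =>
      have hr : rest ≠ [] := by simp at h2; exact List.ne_nil_of_length_pos (by omega)
      simp [J_cons s rest hr, J_single]
    | (m+2), _ =>
      have h2' : m + 1 < rest.length := by simp at h2; omega
      have htk : rest.take (m+1) ≠ [] := by
        apply List.ne_nil_of_length_pos; simp; omega
      have hr : rest ≠ [] := List.ne_nil_of_length_pos (by omega)
      rw [J_cons s rest hr, List.take_succ_cons, J_cons s _ htk, List.drop_succ_cons,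
        ih (m+1) (by omega) h2']
      simp

theorem SF_take (segs : List (List Char)) (n : Nat) (h : SF segs) : SF (segs.take n) :=
  fun s hs => h s (List.mem_of_mem_take hs)

theorem SF_dropLast (segs : List (List Char)) (h : SF segs) : SF segs.dropLast :=
  fun s hs => h s (List.mem_of_mem_dropLast hs)

theorem SF_concat_empty (segs : List (List Char)) (h : SF segs) : SF (segs ++ [[]]) := by
  intro s hs
  rcases List.mem_append.1 hs with h1 | h1
  · exact h s h1
  · simp at h1; simp [h1]

-- length of J over take is strictly monotone from index 1 on
theorem J_take_len_mono (segs : List (List Char)) (m n : Nat) (h1 : 1 ≤ m) (hmn : m < n)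
    (h2 : n ≤ segs.length) : (J (segs.take m)).length < (J (segs.take n)).length := by
  induction n with
  | zero => omega
  | succ k ih =>
    have hk : k < segs.length := by omega
    have htk : segs.take (k+1) = segs.take k ++ [segs[k]] := by
      rw [List.take_add_one]; simp [hk]
    rcases Nat.lt_or_ge m k with hc | hc
    · have := ih hc (by omega)
      rw [htk, J_concat _ (by apply List.ne_nil_of_length_pos; simp; omega) _]
      simp; omega
    · have hmk : m = k := by omega
      subst hmk
      rw [htk, J_concat _ (by apply List.ne_nil_of_length_pos; simp; omega) _]
      simp

theorem take_J_take (segs : List (List Char)) (n : Nat) (h1 : 1 ≤ n) (h2 : n < segs.length) :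
    (J segs).take ((J (segs.take n)).length) = J (segs.take n) := by
  rw [J_split segs n h1 h2]; exact List.take_left ..

theorem drop_J_split (segs : List (List Char)) (n : Nat) (h1 : 1 ≤ n) (h2 : n < segs.length) :
    (J segs).drop ((J (segs.take n)).length + 1) = J (segs.drop n) := by
  rw [J_split segs n h1 h2]
  rw [show J (segs.take n) ++ '/' :: J (segs.drop n) = (J (segs.take n) ++ ['/']) ++ J (segs.drop n) by simp]
  rw [show (J (segs.take n)).length + 1 = (J (segs.take n) ++ ['/']).length by simp]
  exact List.drop_left ..

-- trailing-slash characterization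
theorem suffix_slash_iff (s : List Char) : ['/'] <:+ s ↔ s.getLast? = some '/' := by
  constructor
  · rintro ⟨t, rfl⟩; simp
  · intro h
    have hne : s ≠ [] := by rintro rfl; simp at h
    refine ⟨s.dropLast, ?_⟩
    have h2 := List.dropLast_append_getLast hne
    rw [List.getLast?_eq_some_getLast hne] at h
    simp at h
    rw [h] at h2
    exact h2

theorem getLast?_ne_slash (L : List Char) (h : '/' ∉ L) : L.getLast? ≠ some '/' := by
  intro hL
  have : '/' ∈ L := List.mem_of_getLast? hL
  exact h this

theorem endswith_J (segs : List (List Char)) (hsf : SF segs) :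
    PySem.Chars.endswith (J segs) ['/'] = true ↔ 2 ≤ segs.length ∧ segs.getLast? = some [] := by
  rw [PySem.Chars.endswith_iff, suffix_slash_iff]
  rcases List.eq_nil_or_concat segs with rfl | ⟨init, L, rfl⟩
  · simp [J_nil]
  · rw [List.concat_eq_append] at hsf ⊢
    cases init with
    | nil =>
      simp only [List.nil_append, J_single]
      constructor
      · intro h
        exact absurd h (getLast?_ne_slash L (hsf L (by simp)))
      · intro h; simp at h
    | cons i0 irest =>
      rw [J_concat _ (by simp) _]
      by_cases hL : L = []
      · subst hL
        constructor
        · intro _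
          refine ⟨by simp, ?_⟩
          exact List.getLast?_concat
        · intro _
          rw [show ('/' :: ([] : List Char)) = ['/'] from rfl]
          exact List.getLast?_concat
      · constructor
        · intro h
          rw [show J (i0 :: irest) ++ '/' :: L = (J (i0 :: irest) ++ ['/']) ++ L by simp,
            List.getLast?_append_of_ne_nil _ hL] at h
          exact absurd h (getLast?_ne_slash L (hsf L (by simp)))
        · intro h
          rw [List.getLast?_concat] at h
          simp at h
          exact absurd h hL

theorem finish_eq (segs : List (List Char)) (p : List Char) (hsf : SF segs) (hne : segs ≠ []) :
    finishA (J segs) p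
      = J (if segs.length < 2 ∨ segs.getLast? ≠ some [] then segs ++ [[]] else segs) ++ p := by
  unfold finishA
  by_cases hC : 2 ≤ segs.length ∧ segs.getLast? = some []
  · rw [if_pos ((endswith_J segs hsf).2 hC)]
    have hnc : ¬(segs.length < 2 ∨ segs.getLast? ≠ some []) := by
      intro h
      rcases h with h | h
      · omega
      · exact h hC.2
    rw [if_neg hnc]
  · have h1 : ¬(PySem.Chars.endswith (J segs) ['/'] = true) := fun h => hC ((endswith_J segs hsf).1 h)
    rw [if_neg h1]
    have h2 : segs.length < 2 ∨ segs.getLast? ≠ some [] := by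
      by_contra h
      rw [not_or, not_lt] at h
      have h2' := h.2
      rw [ne_eq, not_not] at h2'
      exact hC ⟨h.1, h2'⟩
    rw [if_pos h2, J_concat segs hne]

-- find machinery
theorem findGo_nil (sub : List Char) (hsub : sub ≠ []) (k : Nat) :
    PySem.Chars.find.go sub [] k = -1 := by
  cases sub with
  | nil => exact absurd rfl hsub
  | cons a l => simp [PySem.Chars.find.go]

theorem findGo_skip (sub' s t : List Char) (hs : '/' ∉ s) (k : Nat) :
    PySem.Chars.find.go ('/' :: sub') (s ++ t) k = PySem.Chars.find.go ('/' :: sub') t (k + s.length) := by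
  induction s generalizing k with
  | nil => simp
  | cons c cs ih =>
    have hc : c ≠ '/' := by intro h; exact hs (by simp [h])
    rw [List.cons_append]
    rw [show PySem.Chars.find.go ('/' :: sub') (c :: (cs ++ t)) k
        = if ('/' :: sub').isPrefixOf (c :: (cs ++ t)) then (k : Int)
          else PySem.Chars.find.go ('/' :: sub') (cs ++ t) (k+1) by simp [PySem.Chars.find.go]]
    rw [if_neg (by simp [List.isPrefixOf]; intro h; exact absurd h.symm hc)]
    rw [ih (fun h => hs (by simp [h])) (k+1)]
    congr 1
    simp [List.length_cons]
    omega

theorem findGo_noslash (sub' s : List Char) (hs : '/' ∉ s) (k : Nat) :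
    PySem.Chars.find.go ('/' :: sub') s k = -1 := by
  have := findGo_skip sub' s [] hs k
  simp at this
  rw [this, findGo_nil _ (by simp)]

theorem findSl (segs : List (List Char)) (hsf : SF segs) (k : Nat) :
    PySem.Chars.find.go ['/'] (J segs) k
      = if 2 ≤ segs.length then ((k + (segs.headI).length : Nat) : Int) else -1 := by
  cases segs with
  | nil =>
    rw [J_nil, findGo_nil _ (by simp)]
    simp
  | cons s rest =>
    cases rest with
    | nil =>
      rw [J_single, findGo_noslash [] s (hsf s (by simp))]
      simp
    | cons t r =>
      rw [J_cons2, findGo_skip [] s ('/' :: J (t :: r)) (hsf s (by simp))]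
      rw [show PySem.Chars.find.go ['/'] ('/' :: J (t :: r)) (k + s.length)
          = if (['/'] : List Char).isPrefixOf ('/' :: J (t :: r)) then ((k + s.length : Nat) : Int)
            else PySem.Chars.find.go ['/'] (J (t :: r)) (k + s.length + 1) by
        simp [PySem.Chars.find.go]]
      rw [if_pos (by simp [List.isPrefixOf])]
      simp

theorem rootKgo_shift (t : List (List Char)) (c : Nat) :
    rootKgo t (c+1) = (rootKgo t c).map (· + 1) := by
  induction t generalizing c with
  | nil => simp [rootKgo]
  | cons s r ih =>
    cases r with
    | nil => simp [rootKgo]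
    | cons u v =>
      by_cases h : s = []
      · simp [rootKgo, h]
      · simp [rootKgo, h, ih]

theorem rootKgo_spec (t : List (List Char)) (c v : Nat) (h : rootKgo t c = some v) :
    c + 2 ≤ v ∧ v ≤ c + t.length ∧ t[v - c - 2]? = some [] := by
  induction t generalizing c with
  | nil => simp [rootKgo] at h
  | cons s r ih =>
    cases r with
    | nil => simp [rootKgo] at h
    | cons u w =>
      by_cases hs : s = []
      · have h' : v = c + 2 := by
          simp only [rootKgo, if_pos hs] at h
          simp at h
          omega
        subst h'
        refine ⟨by omega, by simp only [List.length_cons]; omega, ?_⟩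
        simp [hs]
      · simp only [rootKgo, if_neg hs] at h
        obtain ⟨h1, h2, h3⟩ := ih (c+1) h
        refine ⟨by omega, by simp at h2 ⊢; omega, ?_⟩
        rw [show v - c - 2 = (v - (c+1) - 2) + 1 by omega]
        simpa using h3

theorem dblStep (t : List Char) (k : Nat) :
    PySem.Chars.find.go ['/', '/'] ('/' :: t) k
      = if t.head? = some '/' then (k : Int) else PySem.Chars.find.go ['/', '/'] t (k + 1) := by
  rw [show PySem.Chars.find.go ['/', '/'] ('/' :: t) k
      = if (['/', '/'] : List Char).isPrefixOf ('/' :: t) then (k : Int)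
        else PySem.Chars.find.go ['/', '/'] t (k + 1) by simp [PySem.Chars.find.go]]
  by_cases h : t.head? = some '/'
  · rw [if_pos ?pf, if_pos h]
    case pf =>
      cases t with
      | nil => simp at h
      | cons c r =>
        simp at h
        subst h
        simp [List.isPrefixOf]
  · rw [if_neg ?pf, if_neg h]
    case pf =>
      cases t with
      | nil => simp [List.isPrefixOf]
      | cons c r =>
        simp at h
        simp only [List.isPrefixOf]
        simp [Ne.symm h]

theorem findDbl (segs : List (List Char)) (hsf : SF segs) (k : Nat) :
    PySem.Chars.find.go ['/', '/'] (J segs) k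
      = match rootKgo (segs.drop 1) 1 with
        | none => -1
        | some kk => ((k + (J (segs.take (kk-2))).length : Nat) : Int) := by
  induction segs generalizing k with
  | nil =>
    rw [J_nil, findGo_nil _ (by simp)]
    simp [rootKgo]
  | cons s rest ih =>
    have hs : '/' ∉ s := hsf s (by simp)
    cases rest with
    | nil =>
      rw [J_single, findGo_noslash ['/'] s hs]
      simp [rootKgo]
    | cons t rest2 =>
      rw [J_cons2, findGo_skip ['/'] s _ hs, dblStep]
      cases rest2 with
      | nil =>
        have hhd : (J [t]).head? ≠ some '/' := by
          rw [J_single]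
          intro hh
          cases t with
          | nil => simp at hh
          | cons c r =>
            simp at hh
            exact hsf (c :: r) (by simp) (by rw [hh]; simp)
        rw [if_neg hhd, findGo_noslash ['/'] (J [t]) (by rw [J_single]; exact hsf t (by simp))]
        simp [rootKgo]
      | cons u rest3 =>
        by_cases ht : t = []
        · have hhd : (J (t :: u :: rest3)).head? = some '/' := by
            rw [J_cons2, ht]
            simp
          rw [if_pos hhd]
          have hroot : rootKgo ((s :: t :: u :: rest3).drop 1) 1 = some 3 := by
            simp [rootKgo, ht]
          rw [hroot]
          simp [J_single]
        · have hhd : (J (t :: u :: rest3)).head? ≠ some '/' := by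
            rw [J_cons2]
            cases t with
            | nil => exact absurd rfl ht
            | cons c r =>
              simp
              intro hh
              exact hsf (c :: r) (by simp) (by simp [hh])
          rw [if_neg hhd]
          rw [ih (fun x hx => hsf x (by simp [hx])) (k + s.length + 1)]
          have hshift : rootKgo ((s :: t :: u :: rest3).drop 1) 1
              = (rootKgo ((t :: u :: rest3).drop 1) 1).map (· + 1) := by
            simp only [List.drop_one, List.tail_cons]
            rw [show rootKgo (t :: u :: rest3) 1 = if t = [] then some 3 else rootKgo (u :: rest3) 2
                from rfl, if_neg ht, rootKgo_shift]
          rw [hshift]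
          cases hk : rootKgo ((t :: u :: rest3).drop 1) 1 with
          | none => simp
          | some kk =>
            obtain ⟨hk1, hk2, hk3⟩ := rootKgo_spec _ _ _ hk
            simp only [Option.map_some]
            have htake : (s :: t :: u :: rest3).take (kk + 1 - 2) = s :: (t :: u :: rest3).take (kk - 2) := by
              rw [show kk + 1 - 2 = (kk - 2) + 1 by omega]
              rfl
            rw [htake, J_cons s _ (by
              apply List.ne_nil_of_length_pos
              simp
              omega)]
            simp only [List.length_append, List.length_cons]
            push_cast
            ring

-- rfind machinery
theorem rfindGo_skip (s sub : List Char) (j m : Nat) (hm : m ≤ j)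
    (h : ∀ p, m < p → p ≤ j → ¬ sub <+: s.drop p) :
    PySem.Chars.rfind.go s sub j = PySem.Chars.rfind.go s sub m := by
  induction j with
  | zero => have : m = 0 := by omega
            rw [this]
  | succ i ih =>
    rcases Nat.eq_or_lt_of_le hm with he | hlt
    · rw [he]
    · rw [show PySem.Chars.rfind.go s sub (i+1)
          = if sub.isPrefixOf (s.drop (i+1)) then ((i:Int)+1) else PySem.Chars.rfind.go s sub i
          by simp [PySem.Chars.rfind.go]]
      rw [if_neg (by
        intro hp
        exact h (i+1) hlt (le_refl _) (List.isPrefixOf_iff_prefix.1 hp))]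
      exact ih (by omega) (fun p h1 h2 => h p h1 (by omega))

theorem drop_append_ge (a b : List Char) (p : Nat) (h : a.length ≤ p) :
    (a ++ b).drop p = b.drop (p - a.length) := by
  rw [List.drop_append, List.drop_of_length_le h]
  simp

theorem rfindGo_hit (a L : List Char) :
    PySem.Chars.rfind.go (a ++ '/' :: L) ['/'] a.length = (a.length : Int) := by
  cases ha : a.length with
  | zero =>
    have ha0 : a = [] := List.eq_nil_of_length_eq_zero ha
    subst ha0
    rw [show PySem.Chars.rfind.go ([] ++ '/' :: L) ['/'] 0
        = if (['/'] : List Char).isPrefixOf ([] ++ '/' :: L) then (0:Int) else -1 by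
      simp [PySem.Chars.rfind.go]]
    rw [if_pos (by simp [List.isPrefixOf])]
    simp
  | succ j =>
    rw [show PySem.Chars.rfind.go (a ++ '/' :: L) ['/'] (j+1)
        = if (['/'] : List Char).isPrefixOf ((a ++ '/' :: L).drop (j+1)) then ((j:Int)+1)
          else PySem.Chars.rfind.go (a ++ '/' :: L) ['/'] j by simp [PySem.Chars.rfind.go]]
    rw [show j + 1 = a.length from ha.symm, List.drop_left .., if_pos (by simp [List.isPrefixOf])]
    omega

theorem noslash_drop (s : List Char) (hs : '/' ∉ s) (p : Nat) : ¬ (['/'] <+: s.drop p) := by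
  intro h
  have : '/' ∈ List.drop p s := h.subset (by simp)
  exact hs (List.mem_of_mem_drop this)

theorem rfind_J (segs : List (List Char)) (hsf : SF segs) (hne : segs ≠ []) :
    PySem.Chars.rfind (J segs) ['/']
      = if 2 ≤ segs.length then (((J segs.dropLast).length : Nat) : Int) else -1 := by
  rw [show PySem.Chars.rfind (J segs) ['/'] = PySem.Chars.rfind.go (J segs) ['/'] (J segs).length
      from rfl]
  by_cases h2 : 2 ≤ segs.length
  · have hlast := List.dropLast_append_getLast hne
    set L := segs.getLast hne with hLdef
    have hinit : segs.dropLast ≠ [] := by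
      apply List.ne_nil_of_length_pos
      rw [List.length_dropLast]
      omega
    have hJ : J segs = J segs.dropLast ++ '/' :: L := by
      conv_lhs => rw [← hlast]
      exact J_concat _ hinit _
    have hLsf : '/' ∉ L := hsf L (by rw [← hlast]; simp)
    have hskip : PySem.Chars.rfind.go (J segs) ['/'] (J segs).length
        = PySem.Chars.rfind.go (J segs) ['/'] (J segs.dropLast).length := by
      apply rfindGo_skip _ _ _ _ (by rw [hJ]; simp)
      intro p hp1 hp2
      rw [hJ, show J segs.dropLast ++ '/' :: L = (J segs.dropLast ++ ['/']) ++ L by simp]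
      rw [drop_append_ge _ _ _ (by simp; omega)]
      exact noslash_drop L hLsf _
    rw [hskip, if_pos h2]
    conv_lhs => rw [hJ]
    exact rfindGo_hit (J segs.dropLast) L
  · have hone : segs.length = 1 := by
      cases segs
      · exact absurd rfl hne
      · simp at h2 ⊢; omega
    obtain ⟨s, rfl⟩ : ∃ s, segs = [s] := by
      cases segs with
      | nil => exact absurd rfl hne
      | cons a b =>
        cases b
        · exact ⟨a, rfl⟩
        · simp at hone
    rw [J_single, if_neg h2]
    have hskip : PySem.Chars.rfind.go s ['/'] s.length = PySem.Chars.rfind.go s ['/'] 0 := by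
      apply rfindGo_skip _ _ _ _ (by omega)
      intro p _ _
      exact noslash_drop s (hsf s (by simp)) p
    rw [hskip]
    rw [show PySem.Chars.rfind.go s ['/'] 0 = if (['/'] : List Char).isPrefixOf s then (0:Int) else -1
      by simp [PySem.Chars.rfind.go]]
    rw [if_neg ?pf]
    case pf =>
      intro hp
      have := noslash_drop s (hsf s (by simp)) 0
      simp at this
      exact this (List.isPrefixOf_iff_prefix.1 hp)

theorem take_app_slash (a L : List Char) : (a ++ '/' :: L).take (a.length + 1) = a ++ ['/'] := by
  rw [show a ++ '/' :: L = (a ++ ['/']) ++ L by simp, show a.length + 1 = (a ++ ['/']).length by simp]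
  exact List.take_left ..

-- slice conveniences
theorem slice_take (s : List Char) (m : Nat) :
    PySem.Chars.slice s (some 0) (some (m : Int)) = s.take m := by
  rw [show (0 : Int) = ((0 : Nat) : Int) by norm_num]
  simp [PySem.Chars.slice_eq_listSlice]

theorem slice_neg_one (s : List Char) :
    PySem.Chars.slice s (some 0) (some (-1)) = s.dropLast := by
  simp [PySem.Chars.slice_eq_listSlice, PySem.List.slice_zero_start, PySem.List.slice_to_neg_one]

theorem SF_drop (segs : List (List Char)) (n : Nat) (h : SF segs) : SF (segs.drop n) :=
  fun s hs => h s (List.mem_of_mem_drop hs)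

theorem take_ne_nil (segs : List (List Char)) (K : Nat) (hne : segs ≠ []) (h1 : 1 ≤ K) :
    segs.take K ≠ [] := by
  apply List.ne_nil_of_length_pos
  rw [List.length_take]
  have : 1 ≤ segs.length := by
    cases segs
    · exact absurd rfl hne
    · simp
  omega

theorem rootFinish (segs : List (List Char)) (K : Nat) (hsf : SF segs) (hne : segs ≠ [])
    (h1 : 1 ≤ K) :
    (if PySem.Chars.endswith (J (segs.take K)) ['/'] then J (segs.take K) else J (segs.take K) ++ ['/'])
      = J (if (segs.take K).length < 2 ∨ (segs.take K).getLast? ≠ some []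
            then segs.take K ++ [[]] else segs.take K) := by
  have h := finish_eq (segs.take K) [] (SF_take segs K hsf) (take_ne_nil segs K hne h1)
  unfold finishA at h
  simpa using h

theorem headI_eq_J_take_one (segs : List (List Char)) (hne : segs ≠ []) :
    segs.headI = J (segs.take 1) := by
  cases segs with
  | nil => exact absurd rfl hne
  | cons s r => simp [J_single]

-- the root candidate computed by A's slicing is J (rootSegs segs)
theorem rootA_cand (segs : List (List Char)) (hsf : SF segs) (hne : segs ≠ []) :
    getUrlRoot (J segs) = J (rootSegs segs) := by
  have hlen1 : 1 ≤ segs.length := by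
    cases segs
    · exact absurd rfl hne
    · simp
  simp only [getUrlRoot]
  cases hK : rootKgo (segs.drop 1) 1 with
  | none =>
    have hroot : rootSegs segs
        = if (segs.take 1).length < 2 ∨ (segs.take 1).getLast? ≠ some []
          then segs.take 1 ++ [[]] else segs.take 1 := by
      unfold rootSegs
      rw [hK]
      rfl
    have e1 : PySem.Chars.find (J segs) ['/', '/'] = -1 := by
      rw [show PySem.Chars.find (J segs) ['/', '/'] = PySem.Chars.find.go ['/', '/'] (J segs) 0
          from rfl, findDbl segs hsf 0, hK]
    rw [e1, if_pos rfl, PySem.Chars.findFrom_zero]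
    have e2 : PySem.Chars.find (J segs) ['/'] = if 2 ≤ segs.length
        then (((segs.headI).length : Nat) : Int) else -1 := by
      rw [show PySem.Chars.find (J segs) ['/'] = PySem.Chars.find.go ['/'] (J segs) 0 from rfl]
      rw [findSl segs hsf 0]
      norm_num
    by_cases h2 : 2 ≤ segs.length
    · rw [e2, if_pos h2,
        if_neg (show ¬((((segs.headI).length : Nat) : Int) = -1) by omega)]
      rw [slice_take, headI_eq_J_take_one segs hne, take_J_take segs 1 (le_refl _) (by omega)]
      rw [rootFinish segs 1 hsf hne (le_refl _), hroot]
    · rw [e2, if_neg h2, if_pos rfl]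
      rw [show PySem.Chars.len (J segs) = (((J segs).length : Nat) : Int) from rfl, slice_take,
        List.take_length]
      have hT : segs.take 1 = segs := List.take_of_length_le (by omega)
      rw [show J segs = J (segs.take 1) by rw [hT], rootFinish segs 1 hsf hne (le_refl _), hroot]
  | some kk =>
    obtain ⟨hk1, hk2, hk3⟩ := rootKgo_spec _ _ _ hK
    have hkk3 : 3 ≤ kk := by omega
    have hkk_le : kk ≤ segs.length := by
      rw [List.length_drop] at hk2
      omega
    rw [List.getElem?_drop] at hk3
    rw [show 1 + (kk - 1 - 2) = kk - 2 by omega] at hk3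
    have hklt2 : kk - 2 < segs.length := by omega
    have hgE : segs[kk-2] = ([] : List Char) := by
      rw [List.getElem?_eq_getElem hklt2] at hk3
      simpa using hk3
    have hroot : rootSegs segs
        = if (segs.take kk).length < 2 ∨ (segs.take kk).getLast? ≠ some []
          then segs.take kk ++ [[]] else segs.take kk := by
      unfold rootSegs
      rw [hK]
      rfl
    have e1 : PySem.Chars.find (J segs) ['/', '/']
        = (((J (segs.take (kk-2))).length : Nat) : Int) := by
      rw [show PySem.Chars.find (J segs) ['/', '/'] = PySem.Chars.find.go ['/', '/'] (J segs) 0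
          from rfl, findDbl segs hsf 0, hK]
      norm_num
    have htk1 : segs.take (kk-1) = segs.take (kk-2) ++ [[]] := by
      conv_lhs => rw [show kk - 1 = (kk-2)+1 by omega]
      rw [List.take_add_one, List.getElem?_eq_getElem hklt2, hgE]
      simp
    have hm1 : (J (segs.take (kk-1))).length = (J (segs.take (kk-2))).length + 1 := by
      rw [htk1, J_concat _ (take_ne_nil segs (kk-2) hne (by omega)) _]
      simp
    have hklt1 : kk - 1 < segs.length := by omega
    have hJlen : (J segs).length
        = (J (segs.take (kk-1))).length + 1 + (J (segs.drop (kk-1))).length := by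
      conv_lhs => rw [J_split segs (kk-1) (by omega) hklt1]
      simp
      omega
    rw [e1, if_neg (show ¬((((J (segs.take (kk-2))).length : Nat) : Int) = -1) by omega)]
    rw [show ((((J (segs.take (kk-2))).length : Nat) : Int) + 2)
        = (((J (segs.take (kk-1))).length + 1 : Nat) : Int) by push_cast [hm1]; ring]
    rw [PySem.Chars.findFrom_natCast _ _ _ (by omega)]
    rw [drop_J_split segs (kk-1) (by omega) hklt1]
    have e3 : PySem.Chars.find (J (segs.drop (kk-1))) ['/']
        = if 2 ≤ (segs.drop (kk-1)).length
          then ((((segs.drop (kk-1)).headI).length : Nat) : Int) else -1 := by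
      rw [show PySem.Chars.find (J (segs.drop (kk-1))) ['/']
          = PySem.Chars.find.go ['/'] (J (segs.drop (kk-1))) 0 from rfl]
      rw [findSl _ (SF_drop segs _ hsf) 0]
      norm_num
    by_cases hbig : kk + 1 ≤ segs.length
    · have hd2 : 2 ≤ (segs.drop (kk-1)).length := by
        rw [List.length_drop]
        omega
      rw [e3, if_pos hd2,
        if_neg (show ¬(((((segs.drop (kk-1)).headI).length : Nat) : Int) = -1) by omega)]
      have hhd : (segs.drop (kk-1)).headI = segs[kk-1] := by
        rw [List.drop_eq_getElem_cons hklt1, List.headI_cons]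
      have htkk : segs.take kk = segs.take (kk-1) ++ [segs[kk-1]] := by
        conv_lhs => rw [show kk = (kk-1)+1 by omega]
        rw [List.take_add_one, List.getElem?_eq_getElem hklt1]
        simp
      have hmK : (J (segs.take kk)).length
          = (J (segs.take (kk-1))).length + 1 + segs[kk-1].length := by
        rw [htkk, J_concat _ (take_ne_nil segs (kk-1) hne (by omega)) _]
        simp
        omega
      rw [show (((J (segs.take (kk-1))).length + 1 : Nat) : Int)
            + ((((segs.drop (kk-1)).headI).length : Nat) : Int)
          = (((J (segs.take kk)).length : Nat) : Int) by push_cast [hmK, hhd]; ring]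
      rw [if_neg (show ¬((((J (segs.take kk)).length : Nat) : Int) = -1) by omega)]
      rw [slice_take, take_J_take segs kk (by omega) (by omega)]
      rw [rootFinish segs kk hsf hne (by omega), hroot]
    · have hkeq : kk = segs.length := by omega
      have hd1 : ¬ 2 ≤ (segs.drop (kk-1)).length := by
        rw [List.length_drop]
        omega
      rw [e3, if_neg hd1, if_pos rfl, if_pos rfl]
      rw [show PySem.Chars.len (J segs) = (((J segs).length : Nat) : Int) from rfl, slice_take,
        List.take_length]
      have hT : segs.take kk = segs := List.take_of_length_le (by omega)
      rw [show J segs = J (segs.take kk) by rw [hT], rootFinish segs kk hsf hne (by omega), hroot]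

theorem rootSegs_form (segs : List (List Char)) (hne : segs ≠ []) :
    ∃ a, 1 ≤ a ∧ a ≤ segs.length ∧ rootSegs segs = segs.take a ++ [[]]
      ∧ (rootSegs segs).length = a + 1 := by
  have hlen1 : 1 ≤ segs.length := by
    cases segs
    · exact absurd rfl hne
    · simp
  unfold rootSegs
  cases hK : rootKgo (segs.drop 1) 1 with
  | none =>
    simp only [Option.getD_none]
    have hcond : (segs.take 1).length < 2 ∨ (segs.take 1).getLast? ≠ some [] :=
      Or.inl (by rw [List.length_take]; omega)
    rw [if_pos hcond]
    exact ⟨1, le_refl _, hlen1, rfl, by simp [List.length_take]; omega⟩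
  | some kk =>
    obtain ⟨h1, h2, h3⟩ := rootKgo_spec _ _ _ hK
    have hkk_le : kk ≤ segs.length := by
      rw [List.length_drop] at h2
      omega
    simp only [Option.getD_some]
    by_cases hC : (segs.take kk).length < 2 ∨ (segs.take kk).getLast? ≠ some []
    · rw [if_pos hC]
      exact ⟨kk, by omega, hkk_le, rfl, by simp [List.length_take]; omega⟩
    · rw [if_neg hC]
      have hlast : (segs.take kk).getLast? = some [] := by
        rcases not_or.1 hC with ⟨_, hB⟩
        exact not_not.1 hB
      have hklt : kk - 1 < segs.length := by omega
      have htk : segs.take kk = segs.take (kk-1) ++ [segs[kk-1]] := by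
        conv_lhs => rw [show kk = (kk-1)+1 by omega]
        rw [List.take_add_one, List.getElem?_eq_getElem hklt]
        simp
      have hgl : segs[kk-1] = ([] : List Char) := by
        rw [htk, List.getLast?_concat] at hlast
        simpa using hlast
      rw [htk, hgl]
      exact ⟨kk-1, by omega, by omega, rfl, by simp [List.length_take]; omega⟩

theorem rootSegs_SF (segs : List (List Char)) (hsf : SF segs) (hne : segs ≠ []) :
    SF (rootSegs segs) ∧ rootSegs segs ≠ [] := by
  obtain ⟨a, _, _, hform, _⟩ := rootSegs_form segs hne
  rw [hform]
  exact ⟨SF_concat_empty _ (SF_take _ _ hsf), by simp⟩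

theorem dirA_eq (segs : List (List Char)) (hsf : SF segs) (hne : segs ≠ []) :
    getUrlDir (J segs) = J (if 2 ≤ segs.length then segs.dropLast ++ [[]] else segs) := by
  unfold getUrlDir
  by_cases hC : 2 ≤ segs.length ∧ segs.getLast? = some []
  · rw [if_pos ((endswith_J segs hsf).2 hC)]
    have hdc : segs.dropLast ++ [[]] = segs := by
      have h := List.dropLast_append_getLast hne
      have hg : segs.getLast hne = [] := by
        rw [List.getLast?_eq_some_getLast hne] at hC
        simpa using hC.2
      rw [hg] at h
      exact h
    rw [if_pos hC.1, hdc]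
  · have hnend : ¬(PySem.Chars.endswith (J segs) ['/'] = true) :=
      fun h => hC ((endswith_J segs hsf).1 h)
    rw [if_neg hnend]
    by_cases h2 : 2 ≤ segs.length
    · rw [rfind_J segs hsf hne, if_pos h2]
      rw [if_pos (by omega)]
      rw [show ((J segs.dropLast).length : Int) + 1 = (((J segs.dropLast).length + 1 : Nat) : Int)
        by push_cast; ring]
      rw [slice_take]
      have hlast := List.dropLast_append_getLast hne
      have hinit : segs.dropLast ≠ [] := by
        apply List.ne_nil_of_length_pos
        rw [List.length_dropLast]
        omega
      have hJ : J segs = J segs.dropLast ++ '/' :: (segs.getLast hne) := by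
        conv_lhs => rw [← hlast]
        exact J_concat _ hinit _
      rw [hJ, take_app_slash, if_pos h2, J_concat _ hinit]
    · rw [rfind_J segs hsf hne, if_neg h2, if_neg (by simp), if_neg h2]

theorem J_take_len_lt_iff (segs : List (List Char)) (a b : Nat) (ha1 : 1 ≤ a) (hb1 : 1 ≤ b)
    (ha2 : a ≤ segs.length) (hb2 : b ≤ segs.length) :
    (J (segs.take a)).length < (J (segs.take b)).length ↔ a < b := by
  constructor
  · intro h
    by_contra hc
    rcases Nat.lt_or_ge b a with hba | hba
    · have := J_take_len_mono segs b a hb1 hba ha2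
      omega
    · have hab : a = b := by omega
      rw [hab] at h
      omega
  · intro h
    exact J_take_len_mono segs a b ha1 h hb2

theorem J_form_len (segs : List (List Char)) (a : Nat) (hne : segs ≠ []) (h1 : 1 ≤ a) :
    (J (segs.take a ++ [[]])).length = (J (segs.take a)).length + 1 := by
  rw [J_concat _ (take_ne_nil segs a hne h1)]
  simp

theorem parentCore (segs t : List (List Char)) (hne : segs ≠ [])
    (htsf : SF t) (htne : t ≠ []) (m : Nat) (hm : t = segs.take m) (hm2 : m ≤ segs.length) :
    (if PySem.Chars.len (PySem.Chars.slice (J t) (some 0) (some (PySem.Chars.rfind (J t) ['/'] + 1)))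
        < PySem.Chars.len (J (rootSegs segs))
     then J (rootSegs segs)
     else PySem.Chars.slice (J t) (some 0) (some (PySem.Chars.rfind (J t) ['/'] + 1)))
      = J (if t.length < 2 then rootSegs segs
           else if (t.dropLast ++ [[]]).length < (rootSegs segs).length then rootSegs segs
           else t.dropLast ++ [[]]) := by
  obtain ⟨ar, har1, har2, harf, harl⟩ := rootSegs_form segs hne
  have hrootlen : 1 ≤ (J (rootSegs segs)).length := by
    rw [harf, J_concat _ (take_ne_nil segs ar hne har1)]
    simp
  have htlen : t.length ≤ segs.length := by
    rw [hm, List.length_take]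
    omega
  by_cases ht2 : 2 ≤ t.length
  · rw [rfind_J t htsf htne, if_pos ht2]
    rw [show ((J t.dropLast).length : Int) + 1 = (((J t.dropLast).length + 1 : Nat) : Int) by
      push_cast; ring]
    rw [slice_take]
    have htdlne : t.dropLast ≠ [] := by
      apply List.ne_nil_of_length_pos
      rw [List.length_dropLast]
      omega
    have htl := List.dropLast_append_getLast htne
    have hJt : J t = J t.dropLast ++ '/' :: t.getLast htne := by
      conv_lhs => rw [← htl]
      exact J_concat _ htdlne _
    rw [hJt, take_app_slash]
    have hp : J t.dropLast ++ ['/'] = J (t.dropLast ++ [[]]) := (J_concat _ htdlne _).symm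
    rw [hp]
    have htd : t.dropLast = segs.take (t.length - 1) := by
      rw [List.dropLast_eq_take, hm, List.take_take, List.length_take]
      congr 1
      omega
    have hap1 : 1 ≤ t.length - 1 := by omega
    have hap2 : t.length - 1 ≤ segs.length := by omega
    have hlp : (J (t.dropLast ++ [[]])).length = (J (segs.take (t.length - 1))).length + 1 := by
      rw [htd]
      exact J_form_len segs _ hne hap1
    have hlr : (J (rootSegs segs)).length = (J (segs.take ar)).length + 1 := by
      rw [harf]
      exact J_form_len segs _ hne har1
    have hplen : (t.dropLast ++ [[]]).length = t.length - 1 + 1 := by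
      rw [List.length_append, List.length_dropLast]
      simp
    have hiff := J_take_len_lt_iff segs (t.length - 1) ar hap1 har1 hap2 har2
    have hcmp : ((J (t.dropLast ++ [[]])).length < (J (rootSegs segs)).length)
        ↔ ((t.dropLast ++ [[]]).length < (rootSegs segs).length) := by
      rw [hlp, hlr, harl, hplen]
      rw [htd] at *
      constructor
      · intro hx
        have := hiff.1 (by omega)
        omega
      · intro hx
        have := hiff.2 (by omega)
        omega
    rw [if_neg (show ¬(t.length < 2) by omega)]
    by_cases hcond : (t.dropLast ++ [[]]).length < (rootSegs segs).length
    · rw [if_pos (show PySem.Chars.len (J (t.dropLast ++ [[]])) < PySem.Chars.len (J (rootSegs segs)) by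
        show ((J (t.dropLast ++ [[]])).length : Int) < ((J (rootSegs segs)).length : Int)
        exact_mod_cast hcmp.2 hcond), if_pos hcond]
    · rw [if_neg (show ¬(PySem.Chars.len (J (t.dropLast ++ [[]])) < PySem.Chars.len (J (rootSegs segs))) by
        show ¬(((J (t.dropLast ++ [[]])).length : Int) < ((J (rootSegs segs)).length : Int))
        intro hx
        exact hcond (hcmp.1 (by exact_mod_cast hx))), if_neg hcond]
  · rw [rfind_J t htsf htne, if_neg ht2]
    rw [show (-1 : Int) + 1 = ((0 : Nat) : Int) by norm_num, slice_take, List.take_zero]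
    rw [if_pos (show PySem.Chars.len ([] : List Char) < PySem.Chars.len (J (rootSegs segs)) by
      show ((0 : Nat) : Int) < ((J (rootSegs segs)).length : Int)
      exact_mod_cast hrootlen)]
    rw [if_pos (show t.length < 2 by omega)]

theorem parentA_eq (segs : List (List Char)) (hsf : SF segs) (hne : segs ≠ []) :
    getParentUrl (J segs) = J (parentSegs segs) := by
  have hlen1 : 1 ≤ segs.length := by
    cases segs
    · exact absurd rfl hne
    · simp
  simp only [getParentUrl, parentSegs]
  rw [rootA_cand segs hsf hne]
  by_cases hC : 2 ≤ segs.length ∧ segs.getLast? = some []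
  · rw [if_pos ((endswith_J segs hsf).2 hC), if_pos hC]
    have hdlne : segs.dropLast ≠ [] := by
      apply List.ne_nil_of_length_pos
      rw [List.length_dropLast]
      omega
    have hdl : segs = segs.dropLast ++ [[]] := by
      have h := List.dropLast_append_getLast hne
      have hg : segs.getLast hne = [] := by
        rw [List.getLast?_eq_some_getLast hne] at hC
        simpa using hC.2
      rw [hg] at h
      exact h.symm
    have hJd : PySem.Chars.slice (J segs) (some 0) (some (-1)) = J segs.dropLast := by
      rw [slice_neg_one]
      conv_lhs => rw [hdl, J_concat _ hdlne]
      exact List.dropLast_concat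
    rw [hJd]
    exact parentCore segs segs.dropLast hne (SF_dropLast segs hsf) hdlne
      (segs.length - 1) (by rw [List.dropLast_eq_take]) (by omega)
  · have hnend : ¬(PySem.Chars.endswith (J segs) ['/'] = true) :=
      fun h => hC ((endswith_J segs hsf).1 h)
    rw [if_neg hnend, if_neg hC]
    exact parentCore segs segs hne hsf hne segs.length
      (by rw [List.take_length]) (le_refl _)

theorem parentSegs_SF (segs : List (List Char)) (hsf : SF segs) (hne : segs ≠ []) :
    SF (parentSegs segs) ∧ parentSegs segs ≠ [] := by
  obtain ⟨hr1, hr2⟩ := rootSegs_SF segs hsf hne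
  simp only [parentSegs]
  split_ifs <;>
    first
    | exact ⟨hr1, hr2⟩
    | exact ⟨SF_concat_empty _ (SF_dropLast _ (SF_dropLast _ hsf)), by simp⟩
    | exact ⟨SF_concat_empty _ (SF_dropLast _ hsf), by simp⟩

theorem relLoop_eq (segs : List (List Char)) (path : List Char) :
    SF segs → segs ≠ [] →
      relLoopA (J segs) path = (J (relLoopB segs path).1, (relLoopB segs path).2) := by
  induction segs, path using relLoopB.induct with
  | case1 segs path h ih =>
    intro hsf hne
    rw [relLoopA, relLoopB, if_pos h, if_pos h]
    exact ih hsf hne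
  | case2 segs path h1 h2 ih =>
    intro hsf hne
    rw [relLoopA, relLoopB, if_neg h1, if_neg h1, if_pos h2, if_pos h2]
    rw [parentA_eq segs hsf hne]
    exact ih (parentSegs_SF segs hsf hne).1 (parentSegs_SF segs hsf hne).2
  | case3 segs path h1 h2 =>
    intro hsf hne
    rw [relLoopA, relLoopB, if_neg h1, if_neg h1, if_neg h2, if_neg h2]

-- split-on-'/' as a clean structural recursion
def mapHd (c : Char) : List (List Char) → List (List Char)
  | [] => [[c]]
  | h :: r => (c :: h) :: r

def splitSl : List Char → List (List Char)
  | [] => [[]]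
  | c :: t => if c = '/' then [] :: splitSl t else mapHd c (splitSl t)

theorem splitSl_ne_nil (cs : List Char) : splitSl cs ≠ [] := by
  induction cs with
  | nil => simp [splitSl]
  | cons c t ih =>
    by_cases h : c = '/'
    · simp [splitSl, h]
    · simp only [splitSl, if_neg h]
      cases hs : splitSl t with
      | nil => simp [mapHd]
      | cons a b => simp [mapHd]

theorem splitSl_SF (cs : List Char) : SF (splitSl cs) := by
  induction cs with
  | nil => intro s hs; simp [splitSl] at hs; simp [hs]
  | cons c t ih =>
    by_cases h : c = '/'
    · intro s hs
      simp [splitSl, h] at hs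
      rcases hs with rfl | hs
      · simp
      · exact ih s hs
    · intro s hs
      simp only [splitSl, if_neg h] at hs
      cases hsp : splitSl t with
      | nil => exact absurd hsp (splitSl_ne_nil t)
      | cons a b =>
        rw [hsp] at hs
        simp [mapHd] at hs
        rcases hs with rfl | hs
        · intro hmem
          simp at hmem
          rcases hmem with rfl | hmem
          · exact h rfl
          · exact ih a (by simp [hsp]) hmem
        · exact ih s (by simp [hsp, hs])

theorem J_splitSl (cs : List Char) : J (splitSl cs) = cs := by
  induction cs with
  | nil => simp [splitSl, J_single]
  | cons c t ih =>
    by_cases h : c = '/'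
    · rw [splitSl, if_pos h, J_cons [] (splitSl t) (splitSl_ne_nil t), ih, h]
      simp
    · rw [splitSl, if_neg h]
      cases hsp : splitSl t with
      | nil => exact absurd hsp (splitSl_ne_nil t)
      | cons a b =>
        rw [hsp] at ih
        cases b with
        | nil => simp [mapHd, J_single] at ih ⊢; simp [ih]
        | cons x y =>
          rw [show mapHd c (a :: x :: y) = (c :: a) :: x :: y from rfl, J_cons2]
          rw [J_cons2] at ih
          rw [← ih]
          simp

def mapHdApp (pre : List Char) : List (List Char) → List (List Char)
  | [] => [pre]
  | h :: r => (pre ++ h) :: r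

theorem splitOn_go_eq (fuel : Nat) (l cur : List Char) (acc : List (List Char)) (h : l.length ≤ fuel) :
    PySem.Chars.splitOn.go ['/'] fuel l cur acc = acc.reverse ++ mapHdApp cur.reverse (splitSl l) := by
  induction fuel generalizing l cur acc with
  | zero =>
    have hl : l = [] := by
      cases l
      · rfl
      · simp at h
    subst hl
    rw [show PySem.Chars.splitOn.go ['/'] 0 [] cur acc = ((cur.reverse ++ []) :: acc).reverse by
      simp [PySem.Chars.splitOn.go]]
    simp [splitSl, mapHdApp]
  | succ fuel ih =>
    cases l with
    | nil =>
      rw [show PySem.Chars.splitOn.go ['/'] (fuel+1) [] cur acc = (cur.reverse :: acc).reverse by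
        simp [PySem.Chars.splitOn.go]]
      simp [splitSl, mapHdApp]
    | cons c rest =>
      rw [show PySem.Chars.splitOn.go ['/'] (fuel+1) (c :: rest) cur acc
          = if (['/'] : List Char).isPrefixOf (c :: rest) then
              PySem.Chars.splitOn.go ['/'] fuel (List.drop (['/'] : List Char).length (c :: rest)) [] (cur.reverse :: acc)
            else PySem.Chars.splitOn.go ['/'] fuel rest (c :: cur) acc by
        simp [PySem.Chars.splitOn.go]]
      by_cases hc : c = '/'
      · rw [if_pos (by simp [List.isPrefixOf, hc])]
        rw [show List.drop (['/'] : List Char).length (c :: rest) = rest by simp]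
        rw [ih _ _ _ (by simp at h ⊢; omega)]
        have hmha : mapHdApp (List.reverse []) (splitSl rest) = splitSl rest := by
          cases hsp : splitSl rest with
          | nil => exact absurd hsp (splitSl_ne_nil rest)
          | cons a b => simp [mapHdApp]
        rw [hmha, show splitSl (c :: rest) = [] :: splitSl rest by simp [splitSl, hc]]
        simp [mapHdApp]
      · rw [if_neg (by simp [List.isPrefixOf]; intro hh; exact absurd hh.symm hc)]
        rw [ih _ _ _ (by simp at h ⊢; omega)]
        rw [show splitSl (c :: rest) = mapHd c (splitSl rest) by simp [splitSl, hc]]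
        cases hsp : splitSl rest with
        | nil => exact absurd hsp (splitSl_ne_nil rest)
        | cons a b => simp [mapHdApp, mapHd]

theorem splitOn_eq (cs : List Char) : PySem.Chars.splitOn cs ['/'] = splitSl cs := by
  rw [show PySem.Chars.splitOn cs ['/'] = PySem.Chars.splitOn.go ['/'] (cs.length + 1) cs [] []
      from rfl]
  rw [splitOn_go_eq _ _ _ _ (by omega)]
  cases hs : splitSl cs with
  | nil => exact absurd hs (splitSl_ne_nil cs)
  | cons a b => simp [mapHdApp]

-- ===== new lemmas: B's closed form vs the segment-level loop =====

theorem rcGo_pos (u : List (List Char)) (c : Nat) : 1 ≤ rootCountGo u c := by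
  induction u generalizing c with
  | nil => simp [rootCountGo]
  | cons s r ih =>
    cases r with
    | nil => simp [rootCountGo]
    | cons t w =>
      by_cases h : s = []
      · simp only [rootCountGo, if_pos h]
        split <;> omega
      · simp only [rootCountGo, if_neg h]
        exact ih (c+1)

theorem rcGo_low (u : List (List Char)) (c : Nat) :
    rootCountGo u c = 1 ∨ c + 1 ≤ rootCountGo u c := by
  induction u generalizing c with
  | nil => simp [rootCountGo]
  | cons s r ih =>
    cases r with
    | nil => simp [rootCountGo]
    | cons t w =>
      by_cases h : s = []
      · simp only [rootCountGo, if_pos h]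
        split <;> omega
      · simp only [rootCountGo, if_neg h]
        rcases ih (c+1) with h1 | h1
        · exact Or.inl h1
        · exact Or.inr (by omega)

theorem rcGo_take (u : List (List Char)) (c q : Nat)
    (h1 : rootCountGo u c ≤ c + q) (h2 : q + 1 ≤ u.length) :
    rootCountGo (u.take q ++ [[]]) c = rootCountGo u c := by
  induction u generalizing c q with
  | nil => simp at h2
  | cons s r ih =>
    cases q with
    | zero =>
      -- take 0 ++ [[]] = [[]], base case value 1
      have := rcGo_low (s :: r) c
      rcases this with hv | hv
      · simp [rootCountGo, hv]
      · omega
    | succ q' =>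
      cases r with
      | nil => simp at h2
      | cons t w =>
        by_cases hs : s = []
        · -- scan stops here; the next element inspected agrees
          cases q' with
          | zero =>
            -- LHS list is [s, []]
            simp only [rootCountGo, if_pos hs] at h1 ⊢
            simp only [List.take_succ_cons, List.take_zero, List.nil_append, List.cons_append]
            simp only [rootCountGo, if_pos hs]
            -- LHS next elem is []; RHS: if t = [] then c+1 else c+2 ≤ c+1 forces t = []
            have ht : t = [] := by
              by_contra hh
              rw [if_neg hh] at h1
              omega
            rw [if_pos ht]
            simp
          | succ q'' =>
            simp only [List.take_succ_cons, List.cons_append, rootCountGo, if_pos hs]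
        · simp only [List.take_succ_cons, List.cons_append]
          have h1' : rootCountGo (t :: w) (c+1) ≤ (c+1) + q' := by
            have he : rootCountGo (s :: t :: w) c = rootCountGo (t :: w) (c+1) := by
              simp [rootCountGo, hs]
            omega
          cases hx : (t :: w).take q' ++ [[]] with
          | nil => simp at hx
          | cons x r =>
            have e1 : rootCountGo (s :: x :: r) c = rootCountGo (x :: r) (c+1) := by
              simp [rootCountGo, hs]
            have e2 : rootCountGo (s :: t :: w) c = rootCountGo (t :: w) (c+1) := by
              simp [rootCountGo, hs]
            rw [e1, e2, ← hx]
            exact ih (c+1) q' h1' (by simp at h2 ⊢; omega)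

theorem drop_one_take (ds : List (List Char)) (m : Nat) :
    (ds.take m).drop 1 = (ds.drop 1).take (m - 1) := by
  rw [List.drop_take]

theorem rootCount_pos (segs : List (List Char)) : 1 ≤ rootCount segs := rcGo_pos _ _

theorem rootCount_take (ds : List (List Char)) (m : Nat)
    (hm1 : 1 ≤ m) (ha : rootCount ds ≤ m) (hm2 : m ≤ ds.length - 1) :
    rootCount (ds.take m ++ [[]]) = rootCount ds := by
  have hlen : m + 1 ≤ ds.length := by
    have : 1 ≤ ds.length - 1 := le_trans hm1 hm2
    omega
  have hne : ds.take m ≠ [] := by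
    apply List.ne_nil_of_length_pos
    rw [List.length_take]
    omega
  unfold rootCount
  have hdrop : (ds.take m ++ [[]]).drop 1 = (ds.drop 1).take (m - 1) ++ [[]] := by
    rw [List.drop_append_of_le_length (by rw [List.length_take]; omega), drop_one_take]
  rw [hdrop]
  exact rcGo_take (ds.drop 1) 1 (m-1) (by unfold rootCount at ha; omega)
    (by rw [List.length_drop]; omega)

theorem rcGo_of_kgo_none (u : List (List Char)) (c : Nat) (h : rootKgo u c = none) :
    rootCountGo u c = 1 := by
  induction u generalizing c with
  | nil => simp [rootCountGo]
  | cons s r ih =>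
    cases r with
    | nil => simp [rootCountGo]
    | cons t w =>
      by_cases hs : s = []
      · simp [rootKgo, hs] at h
      · simp only [rootKgo, if_neg hs] at h
        simp only [rootCountGo, if_neg hs]
        exact ih (c+1) h

theorem rcGo_of_kgo_some (u : List (List Char)) (c kk : Nat) (h : rootKgo u c = some kk) :
    rootCountGo u c = if u[kk - c - 1]? = some ([] : List Char) then kk - 1 else kk := by
  induction u generalizing c with
  | nil => simp [rootKgo] at h
  | cons s r ih =>
    cases r with
    | nil => simp [rootKgo] at h
    | cons t w =>
      by_cases hs : s = []
      · have hkk : kk = c + 2 := by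
          simp only [rootKgo, if_pos hs] at h
          simp at h
          omega
        subst hkk
        simp only [rootCountGo, if_pos hs]
        rw [show (s :: t :: w)[c + 2 - c - 1]? = some t by
          rw [show c + 2 - c - 1 = 1 by omega]; rfl]
        by_cases ht : t = []
        · rw [if_pos ht, if_pos (by rw [ht])]
          omega
        · rw [if_neg ht, if_neg (by simp [ht])]
      · simp only [rootKgo, if_neg hs] at h
        obtain ⟨hk1, _, _⟩ := rootKgo_spec _ _ _ h
        simp only [rootCountGo, if_neg hs]
        rw [ih (c+1) h]
        rw [show ((t :: w)[kk - (c+1) - 1]? : Option (List Char)) = (s :: t :: w)[kk - c - 1]? by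
          rw [show kk - c - 1 = (kk - (c+1) - 1) + 1 by omega]
          simp]

theorem getLast_take (segs : List (List Char)) (k : Nat) (h1 : 1 ≤ k) (h2 : k ≤ segs.length) :
    (segs.take k).getLast? = some (segs[k-1]'(by omega)) := by
  rw [show segs.take k = segs.take (k-1) ++ [segs[k-1]'(by omega)] by
    conv_lhs => rw [show k = (k-1)+1 by omega]
    rw [List.take_add_one, List.getElem?_eq_getElem (show k-1 < segs.length by omega)]
    simp]
  exact List.getLast?_concat

theorem rootSegs_eq_count (segs : List (List Char)) (hne : segs ≠ []) :
    rootSegs segs = segs.take (rootCount segs) ++ [[]]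
      ∧ rootCount segs ≤ segs.length
      ∧ (2 ≤ segs.length ∧ segs.getLast? = some [] → rootCount segs ≤ segs.length - 1) := by
  have hlen1 : 1 ≤ segs.length := by
    cases segs
    · exact absurd rfl hne
    · simp
  have hrc : rootCount segs = rootCountGo (segs.drop 1) 1 := rfl
  cases hK : rootKgo (segs.drop 1) 1 with
  | none =>
    have hc : rootCount segs = 1 := by rw [hrc]; exact rcGo_of_kgo_none _ _ hK
    unfold rootSegs
    rw [hK]
    simp only [Option.getD_none]
    refine ⟨?_, by omega, fun _ => by omega⟩
    rw [if_pos (Or.inl (by rw [List.length_take]; omega)), hc]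
  | some kk =>
    obtain ⟨hk1, hk2, _⟩ := rootKgo_spec _ _ _ hK
    rw [List.length_drop] at hk2
    have hkk_le : kk ≤ segs.length := by omega
    have hklt : kk - 1 < segs.length := by omega
    have hc := rcGo_of_kgo_some (segs.drop 1) 1 kk hK
    rw [show ((segs.drop 1)[kk - 1 - 1]? : Option (List Char)) = segs[kk-1]? by
        rw [List.getElem?_drop]; congr 1; omega] at hc
    rw [List.getElem?_eq_getElem hklt] at hc
    have hlast : (segs.take kk).getLast? = some (segs[kk-1]'hklt) :=
      getLast_take segs kk (by omega) hkk_le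
    have htklen : (segs.take kk).length = kk := by rw [List.length_take]; omega
    unfold rootSegs
    rw [hK]
    simp only [Option.getD_some]
    by_cases hg : segs[kk-1]'hklt = ([] : List Char)
    · have hcv : rootCount segs = kk - 1 := by
        rw [hrc, hc, if_pos (by rw [hg])]
      refine ⟨?_, by omega, fun _ => by omega⟩
      rw [if_neg (by
        rw [htklen, hlast]
        rintro (h | h)
        · omega
        · exact h (by rw [hg]))]
      rw [hcv]
      rw [show segs.take kk = segs.take (kk-1) ++ [segs[kk-1]'hklt] by
        conv_lhs => rw [show kk = (kk-1)+1 by omega]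
        rw [List.take_add_one, List.getElem?_eq_getElem hklt]
        simp]
      rw [hg]
    · have hcv : rootCount segs = kk := by
        rw [hrc, hc, if_neg (by simp [hg])]
      refine ⟨?_, by omega, ?_⟩
      · rw [if_pos (Or.inr (by rw [hlast]; simp [hg])), hcv]
      · rintro ⟨hl2, hl⟩
        rw [hcv]
        by_contra hcon
        have hkeq : kk = segs.length := by omega
        subst hkeq
        have h0 := getLast_take segs segs.length (by omega) (le_refl _)
        rw [List.take_length] at h0
        rw [h0] at hl
        simp at hl
        exact hg hl

theorem parent_take (ds : List (List Char)) (m : Nat)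
    (hm1 : 1 ≤ m) (ha : rootCount ds ≤ m) (hm2 : m ≤ ds.length - 1) :
    parentSegs (ds.take m ++ [[]]) = ds.take (max (rootCount ds) (m - 1)) ++ [[]] := by
  have ha1 : 1 ≤ rootCount ds := rootCount_pos ds
  have hlen : m + 1 ≤ ds.length := by omega
  have hTlen : (ds.take m).length = m := by rw [List.length_take]; omega
  have htne : ds.take m ++ [[]] ≠ ([] : List (List Char)) := by simp
  have htlen : (ds.take m ++ [[]]).length = m + 1 := by simp [hTlen]
  have hcount : rootCount (ds.take m ++ [[]]) = rootCount ds := rootCount_take ds m hm1 ha hm2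
  obtain ⟨hform, hble, _⟩ := rootSegs_eq_count (ds.take m ++ [[]]) htne
  rw [hcount] at hform hble
  have httake : (ds.take m ++ [[]]).take (rootCount ds) = ds.take (rootCount ds) := by
    rw [List.take_append_of_le_length (by rw [hTlen]; exact ha), List.take_take,
      Nat.min_eq_left ha]
  have hrform : rootSegs (ds.take m ++ [[]]) = ds.take (rootCount ds) ++ [[]] := by
    rw [hform, httake]
  have hrlen : (rootSegs (ds.take m ++ [[]])).length = rootCount ds + 1 := by
    rw [hrform]
    simp [List.length_take]
    omega
  simp only [parentSegs]
  have hCnd : 2 ≤ (ds.take m ++ [[]]).length ∧ (ds.take m ++ [[]]).getLast? = some [] :=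
    ⟨by omega, List.getLast?_concat⟩
  rw [if_pos hCnd, List.dropLast_concat]
  by_cases hm2' : m < 2
  · rw [if_pos (by rw [hTlen]; omega)]
    have hae : rootCount ds = m := by omega
    rw [hrform, hae, show max m (m-1) = m by omega]
  · rw [if_neg (by rw [hTlen]; omega)]
    have hpd : (ds.take m).dropLast = ds.take (m-1) := by
      rw [List.dropLast_eq_take, hTlen, List.take_take, Nat.min_eq_left (by omega)]
    rw [hpd]
    have hplen : (ds.take (m-1) ++ [[]]).length = m := by
      simp [List.length_take]
      omega
    by_cases hcmp : (ds.take (m-1) ++ [[]]).length < (rootSegs (ds.take m ++ [[]])).length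
    · rw [if_pos hcmp, hrform]
      have hae : rootCount ds = m := by rw [hplen, hrlen] at hcmp; omega
      rw [hae, show max m (m-1) = m by omega]
    · rw [if_neg hcmp]
      have hge : rootCount ds ≤ m - 1 := by rw [hplen, hrlen] at hcmp; omega
      rw [show max (rootCount ds) (m-1) = m - 1 by omega]

theorem slice_from2 (p : List Char) : PySem.Chars.slice p (some 2) none = p.drop 2 := by
  simp only [PySem.Chars.slice_eq_listSlice]
  rw [show (2:Int) = ((2:Nat):Int) by norm_num, PySem.List.slice_from_natCast]

theorem slice_from3 (p : List Char) : PySem.Chars.slice p (some 3) none = p.drop 3 := by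
  simp only [PySem.Chars.slice_eq_listSlice]
  rw [show (3:Int) = ((3:Nat):Int) by norm_num, PySem.List.slice_from_natCast]

theorem sw_len (p t : List Char) (h : PySem.Chars.startswith p t = true) : t.length ≤ p.length :=
  ((PySem.Chars.startswith_iff _ _).1 h).length_le

theorem stripDots_skip (path : List Char) (h1 : PySem.Chars.startswith path ['.', '/'] = true) :
    stripDots path = stripDots (PySem.Chars.slice path (some 2) none) := by
  rw [stripDots, if_pos h1]

theorem stripDots_up (path : List Char) (h1 : ¬ PySem.Chars.startswith path ['.', '/'] = true)
    (h2 : PySem.Chars.startswith path ['.', '.', '/'] = true) :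
    stripDots path = ((stripDots (PySem.Chars.slice path (some 3) none)).1 + 1,
      (stripDots (PySem.Chars.slice path (some 3) none)).2) := by
  rw [stripDots, if_neg h1, if_pos h2]

theorem stripDots_done (path : List Char) (h1 : ¬ PySem.Chars.startswith path ['.', '/'] = true)
    (h2 : ¬ PySem.Chars.startswith path ['.', '.', '/'] = true) :
    stripDots path = (0, path) := by
  rw [stripDots, if_neg h1, if_neg h2]

theorem relLoopB_closed_aux (n : Nat) : ∀ (path : List Char), path.length ≤ n →
    ∀ (ds : List (List Char)) (m : Nat), 1 ≤ m → rootCount ds ≤ m → m ≤ ds.length - 1 →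
    relLoopB (ds.take m ++ [[]]) path
      = (ds.take (max (rootCount ds) (m - (stripDots path).1)) ++ [[]], (stripDots path).2) := by
  induction n with
  | zero =>
    intro path hlen ds m hm1 ha hm2
    have hnil : path = [] := by
      cases path
      · rfl
      · simp at hlen
    subst hnil
    have h1 : ¬ PySem.Chars.startswith ([] : List Char) ['.', '/'] = true := by
      intro h; have := sw_len _ _ h; simp at this
    have h2 : ¬ PySem.Chars.startswith ([] : List Char) ['.', '.', '/'] = true := by
      intro h; have := sw_len _ _ h; simp at this
    rw [relLoopB, if_neg h1, if_neg h2, stripDots_done _ h1 h2]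
    simp [show max (rootCount ds) m = m by omega]
  | succ n ih =>
    intro path hlen ds m hm1 ha hm2
    by_cases h1 : PySem.Chars.startswith path ['.', '/'] = true
    · rw [relLoopB, if_pos h1, stripDots_skip _ h1]
      have hlt : (PySem.Chars.slice path (some 2) none).length ≤ n := by
        rw [slice_from2]
        have := sw_len _ _ h1
        simp at this ⊢
        omega
      exact ih _ hlt ds m hm1 ha hm2
    · by_cases h2 : PySem.Chars.startswith path ['.', '.', '/'] = true
      · rw [relLoopB, if_neg h1, if_pos h2, stripDots_up _ h1 h2]
        rw [parent_take ds m hm1 ha hm2]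
        have hlt : (PySem.Chars.slice path (some 3) none).length ≤ n := by
          rw [slice_from3]
          have := sw_len _ _ h2
          simp at this ⊢
          omega
        have ha1 : 1 ≤ rootCount ds := rootCount_pos ds
        rw [ih _ hlt ds (max (rootCount ds) (m - 1)) (by omega) (by omega) (by omega)]
        rw [show max (rootCount ds)
              (max (rootCount ds) (m - 1) - (stripDots (PySem.Chars.slice path (some 3) none)).1)
            = max (rootCount ds)
              (m - ((stripDots (PySem.Chars.slice path (some 3) none)).1 + 1)) by omega]
      · rw [relLoopB, if_neg h1, if_neg h2, stripDots_done _ h1 h2]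
        simp [show max (rootCount ds) m = m by omega]

theorem parentSegs_single (s : List Char) : parentSegs [s] = [s] ++ [[]] := by
  simp [parentSegs, rootSegs, rootKgo]

theorem relLoopB_single_aux (n : Nat) : ∀ (path : List Char), path.length ≤ n →
    ∀ (s : List Char),
    relLoopB [s] path
      = ((if (stripDots path).1 = 0 then [s] else [s] ++ [[]]), (stripDots path).2) := by
  induction n with
  | zero =>
    intro path hlen s
    have hnil : path = [] := by
      cases path
      · rfl
      · simp at hlen
    subst hnil
    have h1 : ¬ PySem.Chars.startswith ([] : List Char) ['.', '/'] = true := by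
      intro h; have := sw_len _ _ h; simp at this
    have h2 : ¬ PySem.Chars.startswith ([] : List Char) ['.', '.', '/'] = true := by
      intro h; have := sw_len _ _ h; simp at this
    rw [relLoopB, if_neg h1, if_neg h2, stripDots_done _ h1 h2]
    simp
  | succ n ih =>
    intro path hlen s
    by_cases h1 : PySem.Chars.startswith path ['.', '/'] = true
    · rw [relLoopB, if_pos h1, stripDots_skip _ h1]
      have hlt : (PySem.Chars.slice path (some 2) none).length ≤ n := by
        rw [slice_from2]
        have := sw_len _ _ h1
        simp at this ⊢
        omega
      exact ih _ hlt s
    · by_cases h2 : PySem.Chars.startswith path ['.', '.', '/'] = true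
      · rw [relLoopB, if_neg h1, if_pos h2, stripDots_up _ h1 h2]
        rw [parentSegs_single]
        have hlt : (PySem.Chars.slice path (some 3) none).length ≤ n := by
          rw [slice_from3]
          have := sw_len _ _ h2
          simp at this ⊢
          omega
        have hrc : rootCount ([s] ++ [[]]) = 1 := rfl
        have hcl := relLoopB_closed_aux n _ hlt ([s] ++ [[]]) 1 (le_refl _)
          (by rw [hrc]) (by simp)
        rw [hrc] at hcl
        rw [show max 1 (1 - (stripDots (PySem.Chars.slice path (some 3) none)).1) = 1 by
          omega] at hcl
        rw [show (([s] ++ [[]]) : List (List Char)).take 1 = [s] from rfl] at hcl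
        rw [hcl]
        simp
      · rw [relLoopB, if_neg h1, if_neg h2, stripDots_done _ h1 h2]
        simp

theorem rootCount_single (s : List Char) : rootCount [s] = 1 := rfl

theorem main_eq (url path : List Char) : joinUrlA url path = joinUrlB url path := by
  simp only [joinUrlA, joinUrlB]
  by_cases h1 : (PySem.Chars.startswith path "http://".toList
      || PySem.Chars.startswith path "https://".toList) = true
  · rw [if_pos h1, if_pos h1]
  · rw [if_neg h1, if_neg h1]
    rw [splitOn_eq url]
    have hsf := splitSl_SF url
    have hne := splitSl_ne_nil url
    have hJ : J (splitSl url) = url := J_splitSl url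
    obtain ⟨hrform, hrle, hrsm⟩ := rootSegs_eq_count (splitSl url) hne
    have hra1 : 1 ≤ rootCount (splitSl url) := rootCount_pos _
    have hslen : 1 ≤ (splitSl url).length := by
      cases hsp : splitSl url
      · exact absurd hsp hne
      · simp
    by_cases h2 : PySem.Chars.startswith path ['/'] = true
    · rw [if_pos h2, if_pos h2]
      conv_lhs => rw [← hJ]
      rw [rootA_cand (splitSl url) hsf hne, hrform]
      rw [finish_eq _ _ (SF_concat_empty _ (SF_take _ _ hsf)) (by simp)]
      have h2len : 2 ≤ (List.take (rootCount (splitSl url)) (splitSl url) ++ [[]]).length := by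
        have he : (List.take (rootCount (splitSl url)) (splitSl url) ++ [[]]).length
            = min (rootCount (splitSl url)) (splitSl url).length + 1 := by
          simp [List.length_take]
        omega
      rw [if_neg (by
        rintro (h | h)
        · omega
        · exact h List.getLast?_concat)]
      rfl
    · rw [if_neg h2, if_neg h2]
      conv_lhs => rw [← hJ]
      rw [dirA_eq (splitSl url) hsf hne]
      by_cases hl2 : 2 ≤ (splitSl url).length
      · rw [if_pos hl2]
        set segs1 := (splitSl url).dropLast ++ ([[]] : List (List Char)) with hs1
        have hs1sf : SF segs1 := SF_concat_empty _ (SF_dropLast _ hsf)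
        have hs1ne : segs1 ≠ [] := by simp [hs1]
        have hs1len : segs1.length = (splitSl url).length := by
          simp [hs1]
          omega
        have hs1last : segs1.getLast? = some [] := List.getLast?_concat
        obtain ⟨_, _, hs1b⟩ := rootSegs_eq_count segs1 hs1ne
        have hbound : rootCount segs1 ≤ segs1.length - 1 :=
          hs1b ⟨by omega, hs1last⟩
        have ha1 : 1 ≤ rootCount segs1 := rootCount_pos _
        have hm1 : 1 ≤ segs1.length - 1 := by omega
        have htk : segs1.take (segs1.length - 1) ++ [[]] = segs1 := by
          rw [hs1]
          rw [show ((splitSl url).dropLast ++ ([[]] : List (List Char))).length - 1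
              = (splitSl url).dropLast.length by simp]
          rw [List.take_append_of_le_length (le_refl _), List.take_length]
        rw [relLoop_eq segs1 path hs1sf hs1ne]
        have hcl := relLoopB_closed_aux path.length path (le_refl _) segs1
          (segs1.length - 1) hm1 hbound (le_refl _)
        rw [htk] at hcl
        rw [hcl]
        have hkeep1 : 1 ≤ max (rootCount segs1) (segs1.length - 1 - (stripDots path).1) :=
          le_trans ha1 (le_max_left _ _)
        have hkeeple : max (rootCount segs1) (segs1.length - 1 - (stripDots path).1)
            ≤ segs1.length :=
          max_le (le_trans hbound (Nat.sub_le _ _))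
            (le_trans (Nat.sub_le _ _) (Nat.sub_le _ _))
        have hs1pos : 1 ≤ segs1.length := by rw [hs1len]; omega
        rw [finish_eq _ _ (SF_concat_empty _ (SF_take _ _ hs1sf)) (by simp)]
        have h2len : 2 ≤ (List.take (max (rootCount segs1)
            (segs1.length - 1 - (stripDots path).1)) segs1 ++ [[]]).length := by
          have he : (List.take (max (rootCount segs1)
              (segs1.length - 1 - (stripDots path).1)) segs1 ++ [[]]).length
              = min (max (rootCount segs1) (segs1.length - 1 - (stripDots path).1))
                  segs1.length + 1 := by
            simp [List.length_take]
          omega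
        rw [if_neg (by
          rintro (h | h)
          · omega
          · exact h List.getLast?_concat)]
        rfl
      · rw [if_neg hl2]
        obtain ⟨s, hseq⟩ : ∃ s, splitSl url = [s] := by
          cases hsp : splitSl url with
          | nil => exact absurd hsp hne
          | cons a b =>
            cases b with
            | nil => exact ⟨a, rfl⟩
            | cons x y =>
              rw [hsp] at hl2
              simp at hl2
        rw [hseq]
        rw [relLoop_eq [s] path (by rw [hseq] at hsf; exact hsf) (by simp)]
        rw [relLoopB_single_aux path.length path (le_refl _) s]
        simp only [rootCount_single]
        rw [show ([s] : List (List Char)).length = 1 from rfl,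
          show (1 : Nat) - 1 - (stripDots path).1 = 0 by omega, show max 1 0 = 1 by omega,
          show ([s] : List (List Char)).take 1 = [s] by rfl]
        have hssf : SF [s] := by rw [hseq] at hsf; exact hsf
        by_cases hz : (stripDots path).1 = 0
        · rw [if_pos hz]
          rw [finishA, if_neg (by
            intro hes
            have := (endswith_J [s] hssf).1 hes
            simp at this)]
          rw [show (J [s] ++ ['/'] : List Char) = J ([s] ++ [[]]) by
            rw [J_concat _ (by simp)]]
          rfl
        · rw [if_neg hz]
          rw [finishA, if_pos ((endswith_J ([s] ++ [[]]) (SF_concat_empty _ hssf)).2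
            ⟨by simp, List.getLast?_concat⟩)]
          rfl

-- ===== VERDICT (by name: the statement is the Claim_ definition above) =====
theorem join_url_spec : Claim_equal_join_url := by
  intro url path _
  unfold Spec_join_url join_url join_url_alt
  rw [main_eq]
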